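-- pv_equiv track=rewrite | github.com/Techmokid/My-Projects | Completed Projects/Search Algorithm.py | getAllSegmentsOfString
-- ===== SOURCE A (Python) =====
-- def getAllSegmentsOfString(x):
--     segmentList = []
--     currentPointer = 0
--     secondaryPointer = 0
--     while (currentPointer < len(x)):
--         if (currentPointer != secondaryPointer):
--             segmentList.append(x[currentPointer:secondaryPointer])
--
--         secondaryPointer += 1
--         if (secondaryPointer > len(x)):
--             currentPointer += 1
--             secondaryPointer = currentPointer
--
--     return segmentList
-- ===== SOURCE B (Python) =====
-- def getAllSegmentsOfString(x):
--     res = []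
--     for i in range(len(x)):
--         seg = x[i:i]
--         for j in range(i, len(x)):
--             seg = seg + x[j:j+1]
--             res.append(seg)
--     return res
-- ===== Notes on version B (the rewrite author's own statement) =====
-- stated objective: simpler
-- what changed: Replaced A's single while-loop state machine over two pointers (with delayed append and pointer-reset logic) by two plain nested for-loops that extend a running segment by one character and append it, so each substring is built incrementally from the previous one instead of re-sliced.
import Mathlib
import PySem

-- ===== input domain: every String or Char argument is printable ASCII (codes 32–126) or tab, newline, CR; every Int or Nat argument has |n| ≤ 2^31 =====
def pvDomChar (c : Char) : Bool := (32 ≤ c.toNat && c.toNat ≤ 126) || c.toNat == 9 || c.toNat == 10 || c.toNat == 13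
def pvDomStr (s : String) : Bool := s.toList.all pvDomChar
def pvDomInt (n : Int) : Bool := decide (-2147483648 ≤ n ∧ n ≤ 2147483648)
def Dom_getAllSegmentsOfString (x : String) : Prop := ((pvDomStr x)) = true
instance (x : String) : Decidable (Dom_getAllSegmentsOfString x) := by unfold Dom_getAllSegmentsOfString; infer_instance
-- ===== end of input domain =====

-- B replaces A's two-pointer while-loop state machine by nested for-loops that grow a running
-- segment one character at a time (same result, simpler control flow; no speed claim).

-- ===== PORT A =====
-- A's while loop: state (currentPointer, secondaryPointer, segmentList); both pointers are
-- always ≥ 0 so they are carried as Nat and cast to Int at the slice, which is exact here.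
def pvLoopA (x : String) (n : Nat) (cp sp : Nat) (acc : List String) : List String :=
  if _h : cp < n then
    let acc' := if cp ≠ sp then acc ++ [PySem.Str.slice x (some (cp : Int)) (some (sp : Int))] else acc
    if n < sp + 1 then pvLoopA x n (cp + 1) (cp + 1) acc'
    else pvLoopA x n cp (sp + 1) acc'
  else acc
termination_by (n - cp, n + 1 - sp)
decreasing_by
  · exact Prod.Lex.left _ _ (by omega)
  · exact Prod.Lex.right _ (by omega)

def getAllSegmentsOfString (x : String) : List String :=
  pvLoopA x (PySem.Str.len x).toNat 0 0 []

-- ===== PORT B =====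
def getAllSegmentsOfString_alt (x : String) : List String :=
  let n := PySem.Str.len x
  (PySem.List.pyRange 0 n 1).foldl (fun res i =>
    ((PySem.List.pyRange i n 1).foldl
        (fun (p : String × List String) j =>
          let seg := p.1 ++ PySem.Str.slice x (some j) (some (j + 1))
          (seg, p.2 ++ [seg]))
        (PySem.Str.slice x (some i) (some i), res)).2) []

-- ===== PRECONDITION & SPEC =====
def Spec_getAllSegmentsOfString (x : String) (out : List String) : Prop := out = getAllSegmentsOfString_alt x
instance (x : String) (out : List String) : Decidable (Spec_getAllSegmentsOfString x out) := by unfold Spec_getAllSegmentsOfString; infer_instance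

-- ===== CLAIM (what is proved, stated in full; the proofs are below) =====
def Claim_equal_getAllSegmentsOfString : Prop := ∀ (x : String), Dom_getAllSegmentsOfString x → Spec_getAllSegmentsOfString x (getAllSegmentsOfString x)

-- ===== LEMMAS AND PROOFS =====

-- the row of substrings x[i:s] for s running over l (proof-only helper)
def pvRow (x : String) (i : Nat) (l : List Nat) : List String :=
  l.map (fun s => PySem.Str.slice x (some (i : Int)) (some (s : Int)))

theorem pvRow_range'_cons (x : String) (i s k : Nat) :
    pvRow x i (List.range' s (k + 1)) = PySem.Str.slice x (some (i : Int)) (some (s : Int)) :: pvRow x i (List.range' (s + 1) k) := by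
  rw [List.range'_succ]; rfl

-- extending a slice by the next one-character slice (Python: x[i:j] + x[j:j+1] == x[i:j+1])
theorem pvSlice_extend (x : String) (i j : Nat) (hij : i ≤ j) :
    PySem.Str.slice x (some (i : Int)) (some (j : Int)) ++
      PySem.Str.slice x (some (j : Int)) (some ((j : Int) + 1)) =
    PySem.Str.slice x (some (i : Int)) (some ((j + 1 : Nat) : Int)) := by
  rw [← String.toList_inj, String.toList_append]
  simp only [PySem.Str.toList_slice, PySem.Chars.slice_eq_listSlice]
  have h1 : ((j : Int) + 1) = ((j + 1 : Nat) : Int) := by push_cast; ring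
  rw [h1, PySem.List.slice_natCast, PySem.List.slice_natCast, PySem.List.slice_natCast]
  have h2 : j + 1 - i = (j - i) + 1 := by omega
  rw [h2, List.take_add, List.drop_drop]
  have h3 : i + (j - i) = j := by omega
  rw [h3, show j + 1 - j = 1 from by omega]

-- B's inner loop: starting from x[i:j], it produces x[i:j+1], …, x[i:j+k] in order
theorem pvInnerB (x : String) (i : Nat) :
    ∀ (k j : Nat) (res : List String), i ≤ j →
    (PySem.List.pyRange (j : Int) ((j + k : Nat) : Int) 1).foldl
        (fun (p : String × List String) t =>
          let seg := p.1 ++ PySem.Str.slice x (some t) (some (t + 1))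
          (seg, p.2 ++ [seg]))
        (PySem.Str.slice x (some (i : Int)) (some (j : Int)), res)
      = (PySem.Str.slice x (some (i : Int)) (some ((j + k : Nat) : Int)),
         res ++ pvRow x i (List.range' (j + 1) k)) := by
  intro k
  induction k with
  | zero =>
    intro j res _
    rw [PySem.List.pyRange_one_eq_nil (by omega)]
    simp [pvRow]
  | succ k ih =>
    intro j res hij
    rw [PySem.List.pyRange_one_cons (by omega), List.foldl_cons]
    have ih' := ih (j + 1) (res ++ [PySem.Str.slice x (some (i : Int)) (some ((j + 1 : Nat) : Int))]) (by omega)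
    simp only at ih' ⊢
    rw [pvSlice_extend x i j hij,
        show ((j : Int) + 1) = (((j + 1 : Nat)) : Int) from by push_cast; ring,
        show ((j + (k + 1) : Nat) : Int) = (((j + 1) + k : Nat) : Int) from by push_cast; ring,
        ih']
    rw [List.range'_succ]
    simp [pvRow, List.append_assoc]

-- A's inner phase: with cp < sp, the loop appends x[cp:sp], …, x[cp:n] then resets to row cp+1
theorem pvRowA (x : String) (n : Nat) :
    ∀ (k cp sp : Nat) (acc : List String), cp < n → cp < sp → sp + k = n →
    pvLoopA x n cp sp acc
      = pvLoopA x n (cp + 1) (cp + 1) (acc ++ pvRow x cp (List.range' sp (k + 1))) := by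
  intro k
  induction k with
  | zero =>
    intro cp sp acc hcp hsp hn
    rw [pvLoopA]
    simp only [hcp, dif_pos]
    rw [if_pos (show cp ≠ sp by omega), if_pos (show n < sp + 1 by omega)]
    congr 1
  | succ k ih =>
    intro cp sp acc hcp hsp hn
    rw [pvLoopA]
    simp only [hcp, dif_pos]
    rw [if_pos (show cp ≠ sp by omega), if_neg (show ¬ n < sp + 1 by omega)]
    rw [ih cp (sp + 1) _ hcp (by omega) (by omega)]
    congr 1
    rw [pvRow_range'_cons x cp sp (k + 1)]
    simp [List.append_assoc]

-- A's loop starting a fresh row at cp equals B's outer fold from i = cp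
theorem pvOuterAB (x : String) (n : Nat) :
    ∀ (m cp : Nat) (acc : List String), cp + m = n →
    pvLoopA x n cp cp acc
      = (PySem.List.pyRange (cp : Int) ((n : Nat) : Int) 1).foldl (fun res i =>
          ((PySem.List.pyRange i ((n : Nat) : Int) 1).foldl
              (fun (p : String × List String) j =>
                let seg := p.1 ++ PySem.Str.slice x (some j) (some (j + 1))
                (seg, p.2 ++ [seg]))
              (PySem.Str.slice x (some i) (some i), res)).2) acc := by
  intro m
  induction m with
  | zero =>
    intro cp acc hcp
    rw [pvLoopA, PySem.List.pyRange_one_eq_nil (by omega)]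
    simp [show ¬ cp < n by omega]
  | succ m ih =>
    intro cp acc hcp
    have hcpn : cp < n := by omega
    rw [pvLoopA]
    simp only [hcpn, dif_pos]
    rw [if_neg (show ¬ cp ≠ cp by omega), if_neg (show ¬ n < cp + 1 by omega)]
    rw [pvRowA x n m cp (cp + 1) acc hcpn (by omega) (by omega)]
    rw [ih (cp + 1) _ (by omega)]
    rw [PySem.List.pyRange_one_cons (show (cp : Int) < ((n : Nat) : Int) by omega), List.foldl_cons]
    rw [show ((cp : Int) + 1) = (((cp + 1 : Nat)) : Int) from by push_cast; ring]
    congr 1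
    have h := pvInnerB x cp (m + 1) cp acc (le_refl cp)
    simp only at h ⊢
    rw [show ((n : Nat) : Int) = ((cp + (m + 1) : Nat) : Int) from by rw [hcp], h]

-- ===== VERDICT (by name: the statement is the Claim_ definition above) =====
theorem getAllSegmentsOfString_spec : Claim_equal_getAllSegmentsOfString := by
  intro x _
  unfold Spec_getAllSegmentsOfString getAllSegmentsOfString getAllSegmentsOfString_alt
  have hlen : PySem.Str.len x = (((PySem.Str.len x).toNat : Nat) : Int) := by
    rw [PySem.Str.len_eq]; simp
  simp only
  rw [hlen]
  have h := pvOuterAB x (PySem.Str.len x).toNat (PySem.Str.len x).toNat 0 [] (by omega)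
  simpa using h
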